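-- pv_equiv track=rewrite | github.com/RodrigoVanzelotti/lab03_cpd | main.py | contar_ocorrencias
-- ===== SOURCE A (Python) =====
-- def contar_ocorrencias(lista_palavras):
--     # Inicia variáveis necessárias
--     ocorrencias = {}
--     palavra_anterior = None
--     contador = 0
--
--     # Pra cada palavra na lista, verificar se ela é igual a anterior
--     # Se for, realize o contador, se não, apenas o mantenha
--     for palavra in lista_palavras:
--         if palavra != palavra_anterior:
--             if palavra_anterior is not None:
--                 ocorrencias[palavra_anterior] = contador
--             palavra_anterior = palavra
--             contador = 1
--         else:
--             contador += 1
--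
--     # Se a palavra anterior existir, o item correspondente das ocorrencias é igual ao contador
--     if palavra_anterior is not None:
--         ocorrencias[palavra_anterior] = contador
--
--     # Retorna um dicionário de ocorrências
--     return ocorrencias
-- ===== SOURCE B (Python) =====
-- def contar_ocorrencias(lista_palavras):
--     # Two-phase: enumerate maximal consecutive runs by index, then build the dict at once.
--     n = len(lista_palavras)
--     pares = []
--     inicio = 0
--     while inicio < n:
--         fim = inicio + 1
--         while fim < n and lista_palavras[fim] == lista_palavras[inicio]:
--             fim += 1
--         pares.append((lista_palavras[inicio], fim - inicio))
--         inicio = fim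
--     return dict(pares)
-- ===== Notes on version B (the rewrite author's own statement) =====
-- stated objective: alternative
-- what changed: Replaces A's single-pass previous-word/counter state machine (inserting into the dict at each run boundary) by a two-phase algorithm: an index scan that advances to each maximal run's end to collect (word, run-length) pairs, then one dict() construction whose duplicate-key overwrite reproduces A's last-run-wins value with first-insertion position.
import Mathlib
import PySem

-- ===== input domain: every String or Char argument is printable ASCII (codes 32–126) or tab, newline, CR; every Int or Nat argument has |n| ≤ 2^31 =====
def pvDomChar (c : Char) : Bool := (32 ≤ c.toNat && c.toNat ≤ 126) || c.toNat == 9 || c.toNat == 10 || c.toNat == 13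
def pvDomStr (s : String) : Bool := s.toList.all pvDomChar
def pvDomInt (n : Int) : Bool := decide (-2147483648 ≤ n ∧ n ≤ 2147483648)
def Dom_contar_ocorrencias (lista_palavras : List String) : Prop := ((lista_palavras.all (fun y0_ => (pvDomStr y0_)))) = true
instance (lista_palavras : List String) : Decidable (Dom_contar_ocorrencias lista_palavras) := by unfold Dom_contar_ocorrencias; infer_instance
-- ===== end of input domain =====

-- B replaces A's previous-word-and-counter state machine by a two-phase run enumeration
-- (index scan to each run's end, then one dict built from the (word, length) pairs); alternative decomposition, same cost.


-- ===== PORT A =====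
-- one iteration of A's for-loop; state = (ocorrencias, palavra_anterior, contador)
def contarLoop (st : PySem.Dict String Int × Option String × Int) (palavra : String) :
    PySem.Dict String Int × Option String × Int :=
  let (ocorrencias, palavra_anterior, contador) := st
  if some palavra ≠ palavra_anterior then
    let ocorrencias :=
      match palavra_anterior with
      | some p => ocorrencias.insert p contador
      | none => ocorrencias
    (ocorrencias, some palavra, 1)
  else
    (ocorrencias, palavra_anterior, contador + 1)

def contar_ocorrencias (lista_palavras : List String) : List (String × Int) :=
  let st := lista_palavras.foldl contarLoop (PySem.Dict.empty, none, 0)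
  (match st.2.1 with
   | some p => st.1.insert p st.2.2
   | none => st.1).items

-- ===== PORT B =====
-- inner while loop: advance fim while it is in range and the word there equals w
def runEndB (lista_palavras : List String) (w : String) (fim : Nat) : Nat :=
  if (decide (fim < lista_palavras.length) && (lista_palavras.getD fim "" == w)) = true then
    runEndB lista_palavras w (fim + 1)
  else fim
termination_by lista_palavras.length - fim
decreasing_by simp at *; omega

-- termination fact cited by paresB's decreasing_by
theorem runEndB_ge (lista_palavras : List String) (w : String) (fim : Nat) :
    fim ≤ runEndB lista_palavras w fim := by
  unfold runEndB
  split
  · exact le_trans (Nat.le_succ fim) (runEndB_ge lista_palavras w (fim + 1))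
  · exact le_refl fim
termination_by lista_palavras.length - fim
decreasing_by simp at *; omega

-- outer while loop building pares (the append loop transcribed as cons-recursion)
def paresB (lista_palavras : List String) (inicio : Nat) : List (String × Int) :=
  if _h : inicio < lista_palavras.length then
    let fim := runEndB lista_palavras (lista_palavras.getD inicio "") (inicio + 1)
    (lista_palavras.getD inicio "", (fim : Int) - (inicio : Int)) :: paresB lista_palavras fim
  else []
termination_by lista_palavras.length - inicio
decreasing_by
  have := runEndB_ge lista_palavras (lista_palavras.getD inicio "") (inicio + 1)
  omega

def contar_ocorrencias_alt (lista_palavras : List String) : List (String × Int) :=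
  (PySem.Dict.ofList (paresB lista_palavras 0)).items

-- ===== PRECONDITION & SPEC =====
def Spec_contar_ocorrencias (lista_palavras : List String) (out : List (String × Int)) : Prop := out = contar_ocorrencias_alt lista_palavras
instance (lista_palavras : List String) (out : List (String × Int)) : Decidable (Spec_contar_ocorrencias lista_palavras out) := by unfold Spec_contar_ocorrencias; infer_instance

-- ===== CLAIM (what is proved, stated in full; the proofs are below) =====
def Claim_equal_contar_ocorrencias : Prop := ∀ (lista_palavras : List String), Dom_contar_ocorrencias lista_palavras → Spec_contar_ocorrencias lista_palavras (contar_ocorrencias lista_palavras)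

-- ===== LEMMAS AND PROOFS =====

-- length of the maximal equal-to-w prefix
def runLen (w : String) : List String → Nat
  | [] => 0
  | y :: ys => if y = w then runLen w ys + 1 else 0

-- the run list of a word list, recursing on suffixes
def runsL : List String → List (String × Int)
  | [] => []
  | x :: t => (x, 1 + (runLen x t : Int)) :: runsL (t.drop (runLen x t))
termination_by xs => xs.length
decreasing_by simp

-- A's loop, abstracted: the run list starting from pending run (p, c)
def runsFrom (p : String) (c : Int) : List String → List (String × Int)
  | [] => [(p, c)]
  | x :: t => if x = p then runsFrom p (c + 1) t else (p, c) :: runsFrom x 1 t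

theorem runEndB_eq (xs : List String) (w : String) (fim : Nat) :
    runEndB xs w fim = fim + runLen w (xs.drop fim) := by
  unfold runEndB
  split
  · next hcond =>
    simp only [Bool.and_eq_true, decide_eq_true_eq, beq_iff_eq] at hcond
    obtain ⟨hlt, heq⟩ := hcond
    rw [runEndB_eq xs w (fim + 1)]
    rw [List.drop_eq_getElem_cons hlt]
    have : xs[fim] = w := by rwa [List.getD_eq_getElem _ _ hlt] at heq
    simp [runLen, this]
    omega
  · next hcond =>
    simp only [Bool.and_eq_true, decide_eq_true_eq, beq_iff_eq, not_and] at hcond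
    by_cases hlt : fim < xs.length
    · have hne : xs[fim] ≠ w := by
        intro h; exact hcond hlt (by rwa [List.getD_eq_getElem _ _ hlt])
      rw [List.drop_eq_getElem_cons hlt]
      simp [runLen, hne]
    · rw [List.drop_eq_nil_of_le (by omega)]
      simp [runLen]
termination_by xs.length - fim
decreasing_by simp at *; omega

theorem paresB_eq (xs : List String) (inicio : Nat) :
    paresB xs inicio = runsL (xs.drop inicio) := by
  unfold paresB
  split
  · next h =>
    have hx : xs.getD inicio "" = xs[inicio] := List.getD_eq_getElem _ _ h
    have hdrop : xs.drop inicio = xs[inicio] :: xs.drop (inicio + 1) :=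
      List.drop_eq_getElem_cons h
    rw [runEndB_eq]
    show ((xs.getD inicio "",
        ((inicio + 1 + runLen (xs.getD inicio "") (xs.drop (inicio + 1)) : Nat) : Int) - (inicio : Int)) ::
      paresB xs (inicio + 1 + runLen (xs.getD inicio "") (xs.drop (inicio + 1)))) = runsL (xs.drop inicio)
    rw [paresB_eq xs (inicio + 1 + runLen (xs.getD inicio "") (xs.drop (inicio + 1)))]
    have hr : ∀ (y : String) (t : List String), runsL (y :: t) =
        (y, 1 + (runLen y t : Int)) :: runsL (t.drop (runLen y t)) := by
      intro y t
      simp [runsL]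
    rw [hdrop, hx, hr]
    congr 1
    · congr 1
      push_cast
      ring
    · rw [List.drop_drop]
  · next h =>
    rw [List.drop_eq_nil_of_le (by omega)]
    simp [runsL]
termination_by xs.length - inicio
decreasing_by omega

theorem runsFrom_eq (xs : List String) : ∀ (p : String) (c : Int),
    runsFrom p c xs = (p, c + (runLen p xs : Int)) :: runsL (xs.drop (runLen p xs)) := by
  induction xs with
  | nil => intro p c; simp [runsFrom, runLen, runsL]
  | cons x t ih =>
    intro p c
    by_cases hx : x = p
    · subst hx
      have h1 : runsFrom x c (x :: t) = runsFrom x (c + 1) t := by simp [runsFrom]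
      have h2 : runLen x (x :: t) = runLen x t + 1 := by simp [runLen]
      have h3 : List.drop (runLen x t + 1) (x :: t) = List.drop (runLen x t) t := rfl
      rw [h1, ih, h2, h3]
      congr 2
      push_cast; ring
    · have h1 : runsFrom p c (x :: t) = (p, c) :: runsFrom x 1 t := by simp [runsFrom, hx]
      have h2 : runLen p (x :: t) = 0 := by simp [runLen, hx]
      have hr2 : runsL (x :: t) = (x, 1 + (runLen x t : Int)) :: runsL (t.drop (runLen x t)) := by
        simp [runsL]
      rw [h1, h2, ih x 1]
      simp [hr2]

def finishA (st : PySem.Dict String Int × Option String × Int) : PySem.Dict String Int :=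
  match st.2.1 with
  | some p => st.1.insert p st.2.2
  | none => st.1

theorem loopA_eq (xs : List String) : ∀ (p : String) (c : Int) (d : PySem.Dict String Int),
    finishA (xs.foldl contarLoop (d, some p, c)) =
      (runsFrom p c xs).foldl (fun d kv => d.insert kv.1 kv.2) d := by
  induction xs with
  | nil => intro p c d; rfl
  | cons x t ih =>
    intro p c d
    simp only [List.foldl_cons]
    by_cases hx : x = p
    · subst hx
      have hstep : contarLoop (d, some x, c) x = (d, some x, c + 1) := by simp [contarLoop]
      have hr : runsFrom x c (x :: t) = runsFrom x (c + 1) t := by simp [runsFrom]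
      rw [hstep, hr]
      exact ih x (c + 1) d
    · have hstep : contarLoop (d, some p, c) x = (d.insert p c, some x, 1) := by
        simp [contarLoop, hx]
      have hr : runsFrom p c (x :: t) = (p, c) :: runsFrom x 1 t := by simp [runsFrom, hx]
      rw [hstep, hr, List.foldl_cons]
      exact ih x 1 (d.insert p c)

-- ===== VERDICT (by name: the statement is the Claim_ definition above) =====
theorem contar_ocorrencias_spec : Claim_equal_contar_ocorrencias := by
  intro xs _
  unfold Spec_contar_ocorrencias contar_ocorrencias contar_ocorrencias_alt
  rw [paresB_eq, List.drop_zero]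
  cases xs with
  | nil =>
    have h0 : runsL [] = [] := by simp [runsL]
    rw [h0]
    decide
  | cons x t =>
    show (finishA ((x :: t).foldl contarLoop (PySem.Dict.empty, none, 0))).items = _
    have h1 : (x :: t).foldl contarLoop (PySem.Dict.empty, none, 0) =
        t.foldl contarLoop (PySem.Dict.empty, some x, 1) := by
      simp [contarLoop]
    rw [h1, loopA_eq t x 1 PySem.Dict.empty, runsFrom_eq]
    have hr : runsL (x :: t) = (x, 1 + (runLen x t : Int)) :: runsL (t.drop (runLen x t)) := by simp [runsL]
    rw [hr]
    rfl
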